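-- pv_equiv track=rewrite | github.com/iNko97/HoneyCombCSP_IP_Formulation | preprocessor.py | n_c_generator
-- ===== SOURCE A (Python) =====
-- from itertools import product
--
-- def n_c_generator(I_c, _w_max):
--
--     widths = [item[0] for item in I_c]
--
--     max_rows = [_w_max // _width for _width in widths]
--
--     possible_combinations = product(*(range(1, mr + 1) for mr in max_rows))
--
--     valid_combinations = []
--     for combination in possible_combinations:
--         _total_width = sum(widths[i] * combination[i] for i in range(len(widths)))
--
--         if _total_width <= _w_max:
--             # Check if the new combination is dominated
--             if not is_dominated(combination, valid_combinations):
--                 valid_combinations = remove_dominated(valid_combinations, combination)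
--                 valid_combinations.append(combination)
--
--     return valid_combinations
--
-- def is_dominated(new_combo, valid_combinations):
--     for combination in valid_combinations:
--         # Check if combo dominates new_combo
--         if all(combination[i] >= new_combo[i] for i in range(len(new_combo))):
--             return True
--     return False
--
-- def remove_dominated(valid_combinations, new_combo):
--     return [combination for combination in valid_combinations
--             if not all(new_combo[i] >= combination[i] for i in range(len(combination)))]
-- ===== SOURCE B (Python) =====
-- from itertools import product
--
-- def n_c_generator(I_c, _w_max):
--     # Reverse-lexicographic sweep: any dominator of a combination is lexicographically
--     # greater, so enumerating the box top-down means a combination is Pareto-maximal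
--     # iff no already-kept combination dominates it -- no removal pass is ever needed.
--     widths = [item[0] for item in I_c]
--     max_rows = [_w_max // w for w in widths]
--     kept = []
--     for combo in product(*(range(mr, 0, -1) for mr in max_rows)):
--         if sum(w * x for w, x in zip(widths, combo)) <= _w_max:
--             if not any(all(kx >= x for kx, x in zip(k, combo)) for k in kept):
--                 kept.append(combo)
--     kept.reverse()
--     return kept
-- ===== Notes on version B (the rewrite author's own statement) =====
-- stated objective: alternative
-- what changed: B enumerates the box in reverse lexicographic order (descending ranges), where every dominator of a combination has already been seen, so the Pareto front is built append-only with a single domination test per point and no remove_dominated rebuild pass; the kept list is reversed once at the end.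
import Mathlib
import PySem

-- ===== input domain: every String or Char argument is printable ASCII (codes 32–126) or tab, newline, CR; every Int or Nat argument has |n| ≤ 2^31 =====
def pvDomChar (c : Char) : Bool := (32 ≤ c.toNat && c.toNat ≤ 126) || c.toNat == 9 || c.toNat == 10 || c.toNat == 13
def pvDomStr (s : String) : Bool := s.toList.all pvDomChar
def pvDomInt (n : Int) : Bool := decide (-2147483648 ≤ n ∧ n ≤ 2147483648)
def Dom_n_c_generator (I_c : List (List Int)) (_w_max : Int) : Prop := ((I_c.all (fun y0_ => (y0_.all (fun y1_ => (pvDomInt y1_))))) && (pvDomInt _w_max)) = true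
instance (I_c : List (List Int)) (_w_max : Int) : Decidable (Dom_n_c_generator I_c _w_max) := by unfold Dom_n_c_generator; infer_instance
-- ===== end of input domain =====

-- B replaces A's forward sweep with remove_dominated rebuilds by a reverse-lexicographic
-- sweep with an append-only front (alternative decomposition, same exact result).

-- ===== PORT A =====
-- itertools.product(*(range(1, mr+1) for mr in max_rows)), as the standard recursion,
-- leftmost factor outermost (itertools.product order).
def pvProdAsc : List Int → List (List Int)
  | [] => [[]]
  | mr :: rest => (PySem.List.pyRange 1 (mr + 1) 1).flatMap
      (fun x => (pvProdAsc rest).map (fun t => x :: t))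

-- helper is_dominated; indices i ∈ range(len(new_combo)) are in range whenever the
-- lists have equal length, so pyGetD is exact there.
def pvIsDominated (new_combo : List Int) (valid_combinations : List (List Int)) : Bool :=
  valid_combinations.any (fun combination =>
    (List.range new_combo.length).all (fun i =>
      decide (PySem.List.pyGetD new_combo (i : Int) 0 ≤ PySem.List.pyGetD combination (i : Int) 0)))

-- helper remove_dominated
def pvRemoveDominated (valid_combinations : List (List Int)) (new_combo : List Int) : List (List Int) :=
  valid_combinations.filter (fun combination =>
    !((List.range combination.length).all (fun i =>
      decide (PySem.List.pyGetD combination (i : Int) 0 ≤ PySem.List.pyGetD new_combo (i : Int) 0))))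

-- sum(widths[i] * combination[i] for i in range(len(widths)))
def pvTotalA (widths combination : List Int) : Int :=
  ((List.range widths.length).map (fun (i : Nat) =>
    PySem.List.pyGetD widths (i : Int) 0 * PySem.List.pyGetD combination (i : Int) 0)).sum

-- the body of A's for-loop
def pvStepA (widths : List Int) (_w_max : Int) (valid_combinations : List (List Int))
    (combination : List Int) : List (List Int) :=
  if pvTotalA widths combination ≤ _w_max then
    if pvIsDominated combination valid_combinations then valid_combinations
    else pvRemoveDominated valid_combinations combination ++ [combination]
  else valid_combinations

-- item[0] raises IndexError on an empty row and _w_max // w raises ZeroDivisionError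
-- for w = 0; both are excluded by Pre_ below, so the defaults are never reached inside Pre_.
def n_c_generator (I_c : List (List Int)) (_w_max : Int) : List (List Int) :=
  let widths := I_c.map (fun item => PySem.List.pyGetD item 0 0)
  let max_rows := widths.map (fun _width => PySem.Int.floordiv _w_max _width)
  (pvProdAsc max_rows).foldl (pvStepA widths _w_max) []

-- ===== PORT B =====
-- all(kx >= x for kx, x in zip(k, combo))
def pvGE (k combo : List Int) : Bool := (k.zip combo).all (fun p => decide (p.2 ≤ p.1))

-- itertools.product(*(range(mr, 0, -1) for mr in max_rows)) — descending ranges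
def pvProdDesc : List Int → List (List Int)
  | [] => [[]]
  | mr :: rest => (PySem.List.pyRange mr 0 (-1)).flatMap
      (fun x => (pvProdDesc rest).map (fun t => x :: t))

-- the body of B's for-loop: append-only front
def pvStepB (widths : List Int) (_w_max : Int) (kept : List (List Int))
    (combo : List Int) : List (List Int) :=
  if (List.zipWith (fun w x => w * x) widths combo).sum ≤ _w_max then
    if kept.any (fun k => pvGE k combo) then kept else kept ++ [combo]
  else kept

def n_c_generator_alt (I_c : List (List Int)) (_w_max : Int) : List (List Int) :=
  let widths := I_c.map (fun item => PySem.List.pyGetD item 0 0)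
  let max_rows := widths.map (fun w => PySem.Int.floordiv _w_max w)
  ((pvProdDesc max_rows).foldl (pvStepB widths _w_max) []).reverse

-- ===== PRECONDITION & SPEC =====
-- Pre_ excludes exactly the inputs on which the Python A raises: an empty row
-- (IndexError on item[0]) or a row whose first entry is 0 (ZeroDivisionError on //).
def Pre_n_c_generator (I_c : List (List Int)) (_w_max : Int) : Prop :=
  ∀ r ∈ I_c, r ≠ [] ∧ r.headD 0 ≠ 0

instance (I_c : List (List Int)) (_w_max : Int) : Decidable (Pre_n_c_generator I_c _w_max) := by
  unfold Pre_n_c_generator; infer_instance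

def pvWitness_n_c_generator : List (List Int) × Int := ([[2], [3]], 10)

def Spec_n_c_generator (I_c : List (List Int)) (_w_max : Int) (out : List (List Int)) : Prop := out = n_c_generator_alt I_c _w_max
instance (I_c : List (List Int)) (_w_max : Int) (out : List (List Int)) : Decidable (Spec_n_c_generator I_c _w_max out) := by unfold Spec_n_c_generator; infer_instance

-- ===== CLAIM (what is proved, stated in full; the proofs are below) =====
def Claim_equal_n_c_generator : Prop := ∀ (I_c : List (List Int)) (_w_max : Int), Dom_n_c_generator I_c _w_max → Pre_n_c_generator I_c _w_max → Spec_n_c_generator I_c _w_max (n_c_generator I_c _w_max)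

-- ===== LEMMAS AND PROOFS =====

-- canonical pieces the two loop bodies are reduced to
def pvValid (ws : List Int) (W : Int) (c : List Int) : Bool :=
  decide ((List.zipWith (fun w x => w * x) ws c).sum ≤ W)

def pvMaxIn (S : List (List Int)) (c : List Int) : Bool :=
  S.all (fun g => decide (g = c) || !pvGE g c)

-- the maximal elements of S, in S's order: the value both loops maintain
def pvM (S : List (List Int)) : List (List Int) := S.filter (pvMaxIn S)

def pvStepA' (front : List (List Int)) (c : List Int) : List (List Int) :=
  if front.any (fun k => pvGE k c) then front
  else front.filter (fun k => !pvGE c k) ++ [c]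

def pvStepB' (front : List (List Int)) (c : List Int) : List (List Int) :=
  if front.any (fun k => pvGE k c) then front else front ++ [c]

-- strict lexicographic "greater" on equal-length int lists
def pvLexGt : List Int → List Int → Prop
  | a :: as, b :: bs => b < a ∨ (a = b ∧ pvLexGt as bs)
  | _, _ => False
lemma pvGE_cons {x y : Int} {xs ys : List Int} :
    pvGE (x :: xs) (y :: ys) = (decide (y ≤ x) && pvGE xs ys) := by
  simp [pvGE]

lemma pvGE_refl (c : List Int) : pvGE c c = true := by
  induction c with
  | nil => rfl
  | cons x xs ih => simp [pvGE] at ih ⊢; exact ih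

lemma pvGE_trans {a b c : List Int} (h1 : a.length = b.length) (h2 : b.length = c.length)
    (hab : pvGE a b = true) (hbc : pvGE b c = true) : pvGE a c = true := by
  induction a generalizing b c with
  | nil => cases b <;> cases c <;> simp_all [pvGE]
  | cons x xs ih =>
    cases b with
    | nil => simp at h1
    | cons y ys =>
      cases c with
      | nil => simp at h2
      | cons z zs =>
        simp only [pvGE_cons, Bool.and_eq_true, decide_eq_true_eq] at hab hbc ⊢
        exact ⟨le_trans hbc.1 hab.1, ih (by simpa using h1) (by simpa using h2) hab.2 hbc.2⟩

lemma pvGE_sum_lt {a b : List Int} (h : a.length = b.length) (hab : pvGE a b = true)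
    (hne : a ≠ b) : b.sum < a.sum := by
  induction a generalizing b with
  | nil => cases b <;> simp_all
  | cons x xs ih =>
    cases b with
    | nil => simp at h
    | cons y ys =>
      simp only [pvGE_cons, Bool.and_eq_true, decide_eq_true_eq] at hab
      have h' : xs.length = ys.length := by simpa using h
      by_cases hxy : xs = ys
      · subst hxy
        have : y ≠ x := by intro he; exact hne (by rw [he])
        have : y < x := lt_of_le_of_ne hab.1 this
        simp; omega
      · have := ih h' hab.2 hxy
        simp; have := hab.1; omega

lemma pvGE_antisymm {a b : List Int} (h : a.length = b.length) (hab : pvGE a b = true)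
    (hba : pvGE b a = true) : a = b := by
  by_contra hne
  have h1 := pvGE_sum_lt h hab hne
  have h2 := pvGE_sum_lt h.symm hba (fun he => hne he.symm)
  omega

lemma pvLexGt_irrefl {a : List Int} (h : pvLexGt a a) : False := by
  induction a with
  | nil => exact h
  | cons x xs ih => rcases h with h | ⟨_, h⟩; omega; exact ih h

lemma pvLexGt_asymm {a b : List Int} (h1 : pvLexGt a b) (h2 : pvLexGt b a) : False := by
  induction a generalizing b with
  | nil => exact h1
  | cons x xs ih =>
    cases b with
    | nil => exact h1
    | cons y ys =>
      rcases h1 with h1 | ⟨e1, h1⟩ <;> rcases h2 with h2 | ⟨e2, h2⟩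
      · omega
      · omega
      · omega
      · exact ih h1 h2

lemma pvGE_lexGt {a b : List Int} (h : a.length = b.length) (hab : pvGE a b = true)
    (hne : a ≠ b) : pvLexGt a b := by
  induction a generalizing b with
  | nil => cases b <;> simp_all
  | cons x xs ih =>
    cases b with
    | nil => simp at h
    | cons y ys =>
      simp only [pvGE_cons, Bool.and_eq_true, decide_eq_true_eq] at hab
      by_cases hxy : x = y
      · subst hxy
        have hne' : xs ≠ ys := fun he => hne (by rw [he])
        exact Or.inr ⟨rfl, ih (by simpa using h) hab.2 hne'⟩
      · exact Or.inl (lt_of_le_of_ne hab.1 (fun he => hxy he.symm))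
lemma pv_any_congr {α : Type} {l : List α} {p q : α → Bool} (h : ∀ x ∈ l, p x = q x) :
    l.any p = l.any q := by
  induction l with
  | nil => rfl
  | cons x xs ih => simp_all

lemma pvGE_iff {a b : List Int} (h : a.length = b.length) :
    pvGE a b = true ↔ ∀ (i : Nat) (hi : i < b.length), b[i] ≤ a[i]'(by omega) := by
  unfold pvGE
  rw [List.all_eq_true]
  constructor
  · intro hp i hi
    have hz : i < (a.zip b).length := by simp [List.length_zip]; omega
    have := hp ((a.zip b)[i]) (List.getElem_mem hz)
    simpa [List.getElem_zip] using this
  · intro hp p hp2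
    obtain ⟨i, hi, rfl⟩ := List.getElem_of_mem hp2
    have hib : i < b.length := by simp [List.length_zip] at hi; omega
    simpa [List.getElem_zip] using hp i hib

lemma pv_rangeAll_eq {a b : List Int} (h : a.length = b.length) :
    ((List.range b.length).all (fun i =>
      decide (PySem.List.pyGetD b (i : Int) 0 ≤ PySem.List.pyGetD a (i : Int) 0))) = pvGE a b := by
  rw [Bool.eq_iff_iff, List.all_eq_true, pvGE_iff h]
  constructor
  · intro hp i hi
    have := hp i (List.mem_range.mpr hi)
    rw [PySem.List.pyGetD_natCast, PySem.List.pyGetD_natCast,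
        List.getD_eq_getElem _ _ hi, List.getD_eq_getElem _ _ (by omega)] at this
    simpa using this
  · intro hp i hi
    rw [List.mem_range] at hi
    rw [PySem.List.pyGetD_natCast, PySem.List.pyGetD_natCast,
        List.getD_eq_getElem _ _ hi, List.getD_eq_getElem _ _ (by omega)]
    simpa using hp i hi

lemma pvIsDominated_eq {n : Nat} {c : List Int} {F : List (List Int)} (hc : c.length = n)
    (hF : ∀ k ∈ F, k.length = n) :
    pvIsDominated c F = F.any (fun k => pvGE k c) := by
  apply pv_any_congr
  intro k hk
  exact pv_rangeAll_eq (by rw [hF k hk, hc])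

lemma pvRemoveDominated_eq {n : Nat} {c : List Int} {F : List (List Int)} (hc : c.length = n)
    (hF : ∀ k ∈ F, k.length = n) :
    pvRemoveDominated F c = F.filter (fun k => !pvGE c k) := by
  apply List.filter_congr
  intro k hk
  rw [pv_rangeAll_eq (by rw [hF k hk, hc])]

lemma pvTotalA_eq {ws c : List Int} (h : c.length = ws.length) :
    pvTotalA ws c = (List.zipWith (fun w x => w * x) ws c).sum := by
  unfold pvTotalA
  congr 1
  apply List.ext_getElem
  · simp [List.length_zipWith]; omega
  · intro i h1 h2
    simp only [List.getElem_map, List.getElem_range, List.getElem_zipWith]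
    simp only [List.length_map, List.length_range] at h1
    rw [PySem.List.pyGetD_natCast, PySem.List.pyGetD_natCast,
        List.getD_eq_getElem _ _ h1, List.getD_eq_getElem _ _ (by omega)]

lemma pvMaxIn_iff {S : List (List Int)} {c : List Int} :
    pvMaxIn S c = true ↔ ∀ g ∈ S, g ≠ c → pvGE g c = false := by
  unfold pvMaxIn
  rw [List.all_eq_true]
  constructor
  · intro hp g hg hne
    have := hp g hg
    simp [hne] at this
    exact this
  · intro hp g hg
    by_cases hne : g = c
    · simp [hne]
    · simp [hne, hp g hg hne]

lemma pv_cover {n : Nat} {S : List (List Int)} (hlen : ∀ x ∈ S, x.length = n)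
    {d : List Int} (hd : d ∈ S) :
    ∃ f ∈ pvM S, pvGE f d = true := by
  set T := S.filter (fun e => pvGE e d) with hT
  have hdT : d ∈ T := by rw [hT, List.mem_filter]; exact ⟨hd, pvGE_refl d⟩
  have hTne : T ≠ [] := List.ne_nil_of_mem hdT
  obtain ⟨f, hfm⟩ : ∃ f, f ∈ List.argmax List.sum T := by
    cases hm : List.argmax List.sum T with
    | none => exact absurd (List.argmax_eq_none.mp hm) hTne
    | some f => exact ⟨f, by simp [Option.mem_def]⟩
  have hfT : f ∈ T := List.argmax_mem hfm
  rw [hT, List.mem_filter] at hfT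
  refine ⟨f, ?_, hfT.2⟩
  rw [pvM, List.mem_filter]
  refine ⟨hfT.1, pvMaxIn_iff.mpr ?_⟩
  intro g hg hne
  by_contra hge
  rw [Bool.not_eq_false] at hge
  have hgd : pvGE g d = true :=
    pvGE_trans (by rw [hlen g hg, hlen f hfT.1]) (by rw [hlen f hfT.1, hlen d hd]) hge hfT.2
  have hgT : g ∈ T := by rw [hT, List.mem_filter]; exact ⟨hg, hgd⟩
  have := List.not_lt_of_mem_argmax hgT hfm
  have := pvGE_sum_lt (by rw [hlen g hg, hlen f hfT.1]) hge hne
  omega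
lemma pvM_mem_len {n : Nat} {P : List (List Int)} (hlen : ∀ k ∈ P, k.length = n)
    {f : List Int} (hf : f ∈ pvM P) : f.length = n :=
  hlen f (List.mem_of_mem_filter hf)

lemma pvMaxIn_append_singleton {P : List (List Int)} {c e : List Int} :
    pvMaxIn (P ++ [c]) e = (pvMaxIn P e && (decide (c = e) || !pvGE c e)) := by
  simp [pvMaxIn, List.all_append]

lemma pvM_snoc_dom {n : Nat} {P : List (List Int)} {c f : List Int}
    (hlen : ∀ k ∈ P, k.length = n) (hc : c.length = n) (hcP : c ∉ P)
    (hf : f ∈ pvM P) (hfc : pvGE f c = true) : pvM (P ++ [c]) = pvM P := by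
  have hfP : f ∈ P := List.mem_of_mem_filter hf
  have hfmax : pvMaxIn P f = true := List.of_mem_filter hf
  have hflen : f.length = n := hlen f hfP
  have hfne : f ≠ c := fun he => hcP (he ▸ hfP)
  have hcmax : pvMaxIn (P ++ [c]) c = false := by
    by_contra hb
    rw [Bool.not_eq_false, pvMaxIn_iff] at hb
    exact absurd (hb f (by simp [hfP]) hfne) (by simp [hfc])
  unfold pvM
  rw [List.filter_append]
  have h1 : List.filter (pvMaxIn (P ++ [c])) [c] = [] := by simp [hcmax]
  rw [h1, List.append_nil]
  apply List.filter_congr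
  intro e he
  rw [pvMaxIn_append_singleton]
  cases hme : pvMaxIn P e with
  | false => simp
  | true =>
    simp only [Bool.true_and]
    have : (decide (c = e) || !pvGE c e) = true := by
      by_cases hce : c = e
      · simp [hce]
      · simp only [decide_eq_false hce, Bool.false_or, Bool.not_eq_true']
        by_contra hb
        rw [Bool.not_eq_false] at hb
        have hfe : pvGE f e = true :=
          pvGE_trans (by rw [hflen, hc]) (by rw [hc, hlen e he]) hfc hb
        have hfe' : f ≠ e := by
          intro hhe
          subst hhe
          exact hce (pvGE_antisymm (by rw [hc, hlen f he]) hb hfc)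
        rw [pvMaxIn_iff] at hme
        exact absurd (hme f hfP hfe') (by simp [hfe])
    rw [this]

lemma pv_no_dominator {n : Nat} {P : List (List Int)} {c : List Int}
    (hlen : ∀ k ∈ P, k.length = n) (hc : c.length = n)
    (hno : ∀ f ∈ pvM P, pvGE f c = false) :
    ∀ g ∈ P, pvGE g c = false := by
  intro g hg
  by_contra hb
  rw [Bool.not_eq_false] at hb
  obtain ⟨f, hf, hfg⟩ := pv_cover hlen hg
  have : pvGE f c = true :=
    pvGE_trans (by rw [pvM_mem_len hlen hf, hlen g hg]) (by rw [hlen g hg, hc]) hfg hb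
  exact absurd (hno f hf) (by simp [this])

lemma pvM_snoc_undom_core {n : Nat} {P : List (List Int)} {c : List Int}
    (hlen : ∀ k ∈ P, k.length = n) (hc : c.length = n) (hcP : c ∉ P)
    (hno : ∀ f ∈ pvM P, pvGE f c = false) :
    pvM (P ++ [c]) = P.filter (fun e => pvMaxIn P e && !pvGE c e) ++ [c] := by
  have hnog := pv_no_dominator hlen hc hno
  have hcmax : pvMaxIn (P ++ [c]) c = true := by
    rw [pvMaxIn_iff]
    intro g hg hne
    rcases List.mem_append.mp hg with hg | hg
    · exact hnog g hg
    · simp at hg; exact absurd hg hne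
  unfold pvM
  rw [List.filter_append]
  have h1 : List.filter (pvMaxIn (P ++ [c])) [c] = [c] := by simp [hcmax]
  rw [h1]
  congr 1
  apply List.filter_congr
  intro e he
  have hce : c ≠ e := fun hhe => hcP (hhe ▸ he)
  rw [pvMaxIn_append_singleton, decide_eq_false hce, Bool.false_or]

lemma pvM_snoc_undom_A {n : Nat} {P : List (List Int)} {c : List Int}
    (hlen : ∀ k ∈ P, k.length = n) (hc : c.length = n) (hcP : c ∉ P)
    (hno : ∀ f ∈ pvM P, pvGE f c = false) :
    pvM (P ++ [c]) = (pvM P).filter (fun k => !pvGE c k) ++ [c] := by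
  rw [pvM_snoc_undom_core hlen hc hcP hno]
  congr 1
  rw [pvM, List.filter_filter]
  apply List.filter_congr
  intro e _
  rw [Bool.and_comm]

lemma pvM_snoc_undom_B {n : Nat} {P : List (List Int)} {c : List Int}
    (hlen : ∀ k ∈ P, k.length = n) (hc : c.length = n) (hcP : c ∉ P)
    (hno : ∀ f ∈ pvM P, pvGE f c = false)
    (hPc : ∀ e ∈ P, pvLexGt e c) :
    pvM (P ++ [c]) = pvM P ++ [c] := by
  rw [pvM_snoc_undom_core hlen hc hcP hno]
  congr 1
  apply List.filter_congr
  intro e he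
  cases hme : pvMaxIn P e with
  | false => simp
  | true =>
    simp only [Bool.true_and]
    have : pvGE c e = false := by
      by_contra hb
      rw [Bool.not_eq_false] at hb
      have hce : c ≠ e := fun hhe => hcP (hhe ▸ he)
      exact pvLexGt_asymm (pvGE_lexGt (by rw [hc, hlen e he]) hb hce) (hPc e he)
    simp [this]

lemma pv_foldA_main {n : Nat} : ∀ (L P : List (List Int)),
    (∀ x ∈ P ++ L, x.length = n) → (P ++ L).Nodup →
    L.foldl pvStepA' (pvM P) = pvM (P ++ L) := by
  intro L
  induction L with
  | nil => intro P _ _; simp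
  | cons c L' ih =>
    intro P hlen hnd
    have hlenP : ∀ k ∈ P, k.length = n := fun k hk => hlen k (by simp [hk])
    have hc : c.length = n := hlen c (by simp)
    have hcP : c ∉ P := by
      intro hb
      rw [List.nodup_append] at hnd
      exact hnd.2.2 c hb c (by simp) rfl
    have hstep : pvStepA' (pvM P) c = pvM (P ++ [c]) := by
      unfold pvStepA'
      cases h : (pvM P).any (fun k => pvGE k c) with
      | true =>
        obtain ⟨f, hf, hfc⟩ := List.any_eq_true.mp h
        simp only [if_true]
        exact (pvM_snoc_dom hlenP hc hcP hf hfc).symm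
      | false =>
        have hno : ∀ f ∈ pvM P, pvGE f c = false := by
          intro f hf
          have := List.any_eq_false.mp h f hf
          simpa using this
        simp only [Bool.false_eq_true, if_false]
        exact (pvM_snoc_undom_A hlenP hc hcP hno).symm
    have hassoc : P ++ c :: L' = (P ++ [c]) ++ L' := by simp
    rw [List.foldl_cons, hstep, ih (P ++ [c]) (by rw [← hassoc]; exact hlen)
      (by rw [← hassoc]; exact hnd)]
    rw [hassoc]

lemma pv_foldB_main {n : Nat} : ∀ (L P : List (List Int)),
    (∀ x ∈ P ++ L, x.length = n) → (P ++ L).Pairwise pvLexGt →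
    L.foldl pvStepB' (pvM P) = pvM (P ++ L) := by
  intro L
  induction L with
  | nil => intro P _ _; simp
  | cons c L' ih =>
    intro P hlen hpw
    have hlenP : ∀ k ∈ P, k.length = n := fun k hk => hlen k (by simp [hk])
    have hc : c.length = n := hlen c (by simp)
    have hPc : ∀ e ∈ P, pvLexGt e c := by
      intro e he
      exact (List.pairwise_append.mp hpw).2.2 e he c (by simp)
    have hcP : c ∉ P := fun hb => pvLexGt_irrefl (hPc c hb)
    have hstep : pvStepB' (pvM P) c = pvM (P ++ [c]) := by
      unfold pvStepB'
      cases h : (pvM P).any (fun k => pvGE k c) with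
      | true =>
        obtain ⟨f, hf, hfc⟩ := List.any_eq_true.mp h
        simp only [if_true]
        exact (pvM_snoc_dom hlenP hc hcP hf hfc).symm
      | false =>
        have hno : ∀ f ∈ pvM P, pvGE f c = false := by
          intro f hf
          simpa using List.any_eq_false.mp h f hf
        simp only [Bool.false_eq_true, if_false]
        exact (pvM_snoc_undom_B hlenP hc hcP hno hPc).symm
    have hassoc : P ++ c :: L' = (P ++ [c]) ++ L' := by simp
    rw [List.foldl_cons, hstep, ih (P ++ [c]) (by rw [← hassoc]; exact hlen)
      (by rw [← hassoc]; exact hpw)]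
    rw [hassoc]
lemma pvProdAsc_len {mrs : List Int} {c : List Int} (h : c ∈ pvProdAsc mrs) :
    c.length = mrs.length := by
  induction mrs generalizing c with
  | nil => simp [pvProdAsc] at h; simp [h]
  | cons mr rest ih =>
    simp only [pvProdAsc, List.mem_flatMap, List.mem_map] at h
    obtain ⟨x, _, t, ht, rfl⟩ := h
    simp [ih ht]

lemma pvProdAsc_pairwise (mrs : List Int) :
    (pvProdAsc mrs).Pairwise (fun a b => pvLexGt b a) := by
  induction mrs with
  | nil => simp [pvProdAsc]
  | cons mr rest ih =>
    rw [pvProdAsc, List.pairwise_flatMap]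
    constructor
    · intro x _
      rw [List.pairwise_map]
      exact ih.imp (fun h => Or.inr ⟨rfl, h⟩)
    · apply (PySem.List.pairwise_lt_pyRange_one 1 (mr + 1)).imp
      intro x y hxy u hu v hv
      rw [List.mem_map] at hu hv
      obtain ⟨t, _, rfl⟩ := hu
      obtain ⟨t', _, rfl⟩ := hv
      exact Or.inl hxy

lemma pvProdAsc_nodup (mrs : List Int) : (pvProdAsc mrs).Nodup := by
  apply (pvProdAsc_pairwise mrs).imp
  intro a b h he
  exact pvLexGt_irrefl (he ▸ h)

lemma pvProdDesc_eq (mrs : List Int) : pvProdDesc mrs = (pvProdAsc mrs).reverse := by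
  induction mrs with
  | nil => simp [pvProdAsc, pvProdDesc]
  | cons mr rest ih =>
    rw [pvProdDesc, pvProdAsc, ih, PySem.List.pyRange_neg_one_eq_reverse,
        List.reverse_flatMap]
    norm_num
    rfl

lemma pvM_reverse (S : List (List Int)) : pvM S.reverse = (pvM S).reverse := by
  unfold pvM pvMaxIn
  simp only [List.all_reverse]
  rw [List.filter_reverse]
lemma pv_foldA_filter (ws : List Int) (W : Int) (L : List (List Int)) (front : List (List Int)) :
    L.foldl (pvStepA ws W) front =
      (L.filter (fun c => decide (pvTotalA ws c ≤ W))).foldl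
        (fun front c => if pvIsDominated c front then front
                        else pvRemoveDominated front c ++ [c]) front := by
  rw [List.foldl_filter]
  congr 1
  funext x y
  simp only [pvStepA, decide_eq_true_eq]

lemma pv_foldB_filter (ws : List Int) (W : Int) (L : List (List Int)) (front : List (List Int)) :
    L.foldl (pvStepB ws W) front = (L.filter (pvValid ws W)).foldl pvStepB' front := by
  rw [List.foldl_filter]
  congr 1
  funext x y
  simp only [pvStepB, pvStepB', pvValid, decide_eq_true_eq]

lemma pv_foldA_canon {n : Nat} : ∀ (L : List (List Int)) (front : List (List Int)),
    (∀ x ∈ L, x.length = n) → (∀ k ∈ front, k.length = n) →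
    L.foldl (fun front c => if pvIsDominated c front then front
                            else pvRemoveDominated front c ++ [c]) front =
      L.foldl pvStepA' front := by
  intro L
  induction L with
  | nil => intro front _ _; rfl
  | cons c L' ih =>
    intro front hL hF
    have hc : c.length = n := hL c (by simp)
    have hF' : ∀ k ∈ front, k.length = n := hF
    have hstep : (if pvIsDominated c front then front
                  else pvRemoveDominated front c ++ [c]) = pvStepA' front c := by
      rw [pvIsDominated_eq hc hF', pvRemoveDominated_eq hc hF', pvStepA']
    have hlen2 : ∀ k ∈ pvStepA' front c, k.length = n := by
      intro k hk
      unfold pvStepA' at hk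
      split at hk
      · exact hF k hk
      · rcases List.mem_append.mp hk with hk | hk
        · exact hF k (List.mem_of_mem_filter hk)
        · simp at hk; rw [hk]; exact hc
    rw [List.foldl_cons, List.foldl_cons, hstep,
        ih (pvStepA' front c) (fun x hx => hL x (by simp [hx])) hlen2]

-- ===== VERDICT (by name: the statement is the Claim_ definition above) =====
theorem n_c_generator_spec : Claim_equal_n_c_generator := by
  intro I_c _w_max _dom _pre
  unfold Spec_n_c_generator n_c_generator n_c_generator_alt
  dsimp only
  set ws := I_c.map (fun item => PySem.List.pyGetD item 0 0) with hws
  set mrs := ws.map (fun _width => PySem.Int.floordiv _w_max _width) with hmrs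
  set La := (pvProdAsc mrs).filter (pvValid ws _w_max) with hLa
  have hlenwm : mrs.length = ws.length := by rw [hmrs, List.length_map]
  have hLmem : ∀ c ∈ pvProdAsc mrs, c.length = ws.length := fun c hc => by
    rw [pvProdAsc_len hc, hlenwm]
  have hLamem : ∀ c ∈ La, c.length = ws.length := fun c hc =>
    hLmem c (List.mem_of_mem_filter hc)
  have hA : (pvProdAsc mrs).foldl (pvStepA ws _w_max) [] = pvM La := by
    rw [pv_foldA_filter]
    have hfe : (pvProdAsc mrs).filter (fun c => decide (pvTotalA ws c ≤ _w_max)) = La := by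
      rw [hLa]
      apply List.filter_congr
      intro c hc
      rw [pvTotalA_eq (hLmem c hc)]
      rfl
    rw [hfe, pv_foldA_canon (n := ws.length) La [] hLamem (by simp)]
    have hnd : ([] ++ La).Nodup := by
      simp only [List.nil_append]
      exact List.filter_sublist.nodup (pvProdAsc_nodup mrs)
    have := pv_foldA_main (n := ws.length) La []
      (by simpa using hLamem) hnd
    simpa [pvM] using this
  have hB : ((pvProdDesc mrs).foldl (pvStepB ws _w_max) []).reverse = pvM La := by
    rw [pv_foldB_filter, pvProdDesc_eq, List.filter_reverse, ← hLa]
    have hpw : ([] ++ La.reverse).Pairwise pvLexGt := by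
      simp only [List.nil_append]
      rw [List.pairwise_reverse]
      exact (pvProdAsc_pairwise mrs).sublist List.filter_sublist
    have := pv_foldB_main (n := ws.length) La.reverse []
      (by simpa using fun c hc => hLamem c (List.mem_reverse.mp hc)) hpw
    have h2 : La.reverse.foldl pvStepB' [] = pvM La.reverse := by simpa [pvM] using this
    rw [h2, pvM_reverse, List.reverse_reverse]
  rw [hA, hB]
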